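-- pv_equiv track=rewrite | github.com/rwei1218/Seq2Seq_pretrained | rouge_process.py | clean_ref
-- ===== SOURCE A (Python) =====
-- def clean_ref(text_list):
--     final_list = []
--     for word in text_list:
--         if word != '[CLS]':
--             if word != '[SEP]':
--                 final_list.append(word)
--             else:
--                 break
--     return final_list
-- ===== SOURCE B (Python) =====
-- def clean_ref(text_list):
--     if '[SEP]' in text_list:
--         text_list = text_list[:text_list.index('[SEP]')]
--     return [w for w in text_list if w != '[CLS]']
-- ===== Notes on version B (the rewrite author's own statement) =====
-- stated objective: simpler
-- what changed: Replaces the single scan with an inline break by a locate-and-truncate at the first '[SEP]' followed by a separate filter pass dropping '[CLS]' tokens.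
import Mathlib
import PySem

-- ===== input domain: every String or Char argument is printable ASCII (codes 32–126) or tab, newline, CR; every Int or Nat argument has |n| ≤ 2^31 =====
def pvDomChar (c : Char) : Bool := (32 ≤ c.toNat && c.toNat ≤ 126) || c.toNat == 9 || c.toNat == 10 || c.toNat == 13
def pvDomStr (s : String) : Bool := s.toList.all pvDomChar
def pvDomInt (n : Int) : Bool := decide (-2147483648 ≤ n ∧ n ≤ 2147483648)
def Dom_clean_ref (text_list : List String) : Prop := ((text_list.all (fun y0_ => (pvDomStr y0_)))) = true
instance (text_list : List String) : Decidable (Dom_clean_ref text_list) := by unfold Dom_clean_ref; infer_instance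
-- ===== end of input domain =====

-- B replaces A's single scan-with-break by truncating at the first '[SEP]' and then filtering out '[CLS]' in a separate pass (simpler decomposition).

-- ===== PORT A =====
-- A's for-loop with break, as the obvious structural recursion over the list.
def clean_ref (text_list : List String) : List String :=
  match text_list with
  | [] => []
  | w :: ws =>
    if w ≠ "[CLS]" then
      if w ≠ "[SEP]" then w :: clean_ref ws
      else []
    else clean_ref ws

-- ===== PORT B =====
-- truncate at the first '[SEP]' (guarded membership; the none branch is unreachable under the guard), then filter '[CLS]'
def clean_ref_alt (text_list : List String) : List String :=
  let tl :=
    if "[SEP]" ∈ text_list then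
      match PySem.List.index? text_list "[SEP]" with
      | some i => PySem.List.slice text_list none (some (i : Int))
      | none => text_list
    else text_list
  tl.filter (fun w => w ≠ "[CLS]")

-- ===== PRECONDITION & SPEC =====
def Spec_clean_ref (text_list : List String) (out : List String) : Prop := out = clean_ref_alt text_list
instance (text_list : List String) (out : List String) : Decidable (Spec_clean_ref text_list out) := by unfold Spec_clean_ref; infer_instance

-- ===== CLAIM (what is proved, stated in full; the proofs are below) =====
def Claim_equal_clean_ref : Prop := ∀ (text_list : List String), Dom_clean_ref text_list → Spec_clean_ref text_list (clean_ref text_list)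

-- ===== LEMMAS AND PROOFS =====

theorem clean_ref_eq_alt : ∀ (l : List String), clean_ref l = clean_ref_alt l := by
  intro l
  induction l with
  | nil => simp [clean_ref, clean_ref_alt]
  | cons w ws ih =>
    by_cases hsep : w = "[SEP]"
    · subst hsep
      rw [clean_ref_alt, clean_ref]
      rw [PySem.List.index?_cons_self]
      simp [PySem.List.slice]
    · have hne : w ≠ "[SEP]" := hsep
      rw [clean_ref_alt]
      by_cases hmem : "[SEP]" ∈ ws
      · obtain ⟨i, hi⟩ := Option.isSome_iff_exists.1 ((PySem.List.index?_isSome_iff ws "[SEP]").2 hmem)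
        have hi' : PySem.List.index? (w :: ws) "[SEP]" = some (i + 1) := by
          rw [PySem.List.index?_cons_of_ne ws hne, hi]; rfl
        have hmem' : "[SEP]" ∈ w :: ws := List.mem_cons_of_mem _ hmem
        rw [if_pos hmem', hi']
        rw [clean_ref, ih, clean_ref_alt]
        rw [if_pos hmem, hi]
        simp only [PySem.List.slice_to_natCast, List.take_succ_cons]
        by_cases hcls : w = "[CLS]"
        · simp [hcls]
        · simp [hcls, hne]
      · have hmem' : "[SEP]" ∉ w :: ws := by
          simp [List.mem_cons, hne.symm, hmem]
        rw [if_neg hmem']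
        rw [clean_ref, ih, clean_ref_alt, if_neg hmem]
        by_cases hcls : w = "[CLS]"
        · simp [hcls]
        · simp [hcls, hne]

-- ===== VERDICT (by name: the statement is the Claim_ definition above) =====
theorem clean_ref_spec : Claim_equal_clean_ref := by
  intro l _
  unfold Spec_clean_ref
  exact clean_ref_eq_alt l
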